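-- pv_equiv track=rewrite | github.com/AthharPro/zypher | python-scanner/zypher_scanner/scanner/rules/rule_insufficient_pbac.py | _find_stage_line
-- ===== SOURCE A (Python) =====
-- from typing import List, Dict, Any, Optional
--
-- def _find_stage_line(file_lines: List[str], stage_idx: int) -> int:
--     """
--     Find the line number for a specific stage.
--
--     Args:
--         file_lines: The file lines
--         stage_idx: Index of the stage
--
--     Returns:
--         Line number if found, -1 otherwise
--     """
--     stage_marker_count = -1
--
--     for i, line in enumerate(file_lines):
--         if "stage:" in line or "- stage:" in line:
--             stage_marker_count += 1
--             if stage_marker_count == stage_idx: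
--                 return i
--
--     return -1
-- ===== SOURCE B (Python) =====
-- from typing import List
--
-- def _find_stage_line(file_lines: List[str], stage_idx: int) -> int:
--     # Collect every marker line index, then select the nth.
--     # ("- stage:" in line implies "stage:" in line, so one test suffices.)
--     markers = [i for i, line in enumerate(file_lines) if "stage:" in line]
--     return markers[stage_idx] if 0 <= stage_idx < len(markers) else -1
-- ===== Notes on version B (the rewrite author's own statement) =====
-- stated objective: simpler
-- what changed: Replaces the early-return scan with a stateful marker counter by a collect-then-select decomposition: build the list of all marker line indices in one comprehension (dropping the redundant '- stage:' test, which is subsumed by 'stage:'), then return the stage_idx-th entry if it exists, else -1.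
import Mathlib
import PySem

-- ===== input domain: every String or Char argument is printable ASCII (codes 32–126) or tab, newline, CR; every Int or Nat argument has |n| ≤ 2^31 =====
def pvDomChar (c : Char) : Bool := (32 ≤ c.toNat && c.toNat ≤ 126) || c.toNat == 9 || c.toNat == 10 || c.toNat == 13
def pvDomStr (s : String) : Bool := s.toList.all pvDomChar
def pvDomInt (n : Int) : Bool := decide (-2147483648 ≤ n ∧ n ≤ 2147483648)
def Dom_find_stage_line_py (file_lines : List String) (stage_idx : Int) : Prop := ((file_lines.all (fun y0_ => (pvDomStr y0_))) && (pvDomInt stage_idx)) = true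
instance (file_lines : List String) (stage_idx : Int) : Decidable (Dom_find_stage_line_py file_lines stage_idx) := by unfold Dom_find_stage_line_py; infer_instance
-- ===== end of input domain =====

-- B replaces A's early-return scan with counter by collect-all-markers-then-select (simpler decomposition).


-- ===== PORT A =====
-- A's scan: for (i, line) in enumerate(file_lines): if marker, bump count; return i when count == stage_idx.
def pvFindLoop (pairs : List (Int × String)) (cnt stage_idx : Int) : Int :=
  match pairs with
  | [] => -1
  | (i, line) :: rest =>
    if PySem.Str.isIn "stage:" line || PySem.Str.isIn "- stage:" line then
      if cnt + 1 = stage_idx then i else pvFindLoop rest (cnt + 1) stage_idx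
    else pvFindLoop rest cnt stage_idx

def find_stage_line_py (file_lines : List String) (stage_idx : Int) : Int :=
  pvFindLoop (PySem.List.enumerate file_lines 0) (-1) stage_idx

-- ===== PORT B =====
def find_stage_line_py_alt (file_lines : List String) (stage_idx : Int) : Int :=
  let markers := ((PySem.List.enumerate file_lines 0).filter
      (fun p => PySem.Str.isIn "stage:" p.2)).map (·.1)
  if 0 ≤ stage_idx ∧ stage_idx < (markers.length : Int) then
    PySem.List.pyGetD markers stage_idx (-1)
  else -1

-- ===== PRECONDITION & SPEC =====
def Spec_find_stage_line_py (file_lines : List String) (stage_idx : Int) (out : Int) : Prop := out = find_stage_line_py_alt file_lines stage_idx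
instance (file_lines : List String) (stage_idx : Int) (out : Int) : Decidable (Spec_find_stage_line_py file_lines stage_idx out) := by unfold Spec_find_stage_line_py; infer_instance

-- ===== CLAIM (what is proved, stated in full; the proofs are below) =====
def Claim_equal_find_stage_line_py : Prop := ∀ (file_lines : List String) (stage_idx : Int), Dom_find_stage_line_py file_lines stage_idx → Spec_find_stage_line_py file_lines stage_idx (find_stage_line_py file_lines stage_idx)

-- ===== LEMMAS AND PROOFS =====

-- "- stage:" in line implies "stage:" in line, so A's disjunction equals B's single test.
theorem pvCond_eq (line : String) :
    (PySem.Str.isIn "stage:" line || PySem.Str.isIn "- stage:" line)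
      = PySem.Str.isIn "stage:" line := by
  cases h : PySem.Str.isIn "- stage:" line
  · simp
  · have h2 : PySem.Str.isIn "stage:" line = true := by
      rw [PySem.Str.isIn_iff_infix] at h ⊢
      exact List.IsInfix.trans (by decide) h
    rw [h2]
    rfl

-- main loop invariant: A's scan with counter cnt selects the (stage_idx - cnt - 1)-th marker.
theorem pvLoop_eq (fl : List String) (s cnt stage_idx : Int) :
    pvFindLoop (PySem.List.enumerate fl s) cnt stage_idx =
      (let m := ((PySem.List.enumerate fl s).filter
          (fun p => PySem.Str.isIn "stage:" p.2)).map (·.1)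
       if cnt < stage_idx ∧ stage_idx - cnt - 1 < (m.length : Int) then
         PySem.List.pyGetD m (stage_idx - cnt - 1) (-1)
       else -1) := by
  induction fl generalizing s cnt with
  | nil =>
    simp only [PySem.List.enumerate, pvFindLoop, List.filter_nil, List.map_nil,
      List.length_nil, Int.natCast_zero]
    rw [if_neg (by omega)]
  | cons line rest ih =>
    rw [PySem.List.enumerate_cons]
    simp only [pvFindLoop, pvCond_eq]
    cases hc : PySem.Str.isIn "stage:" line
    · rw [if_neg (by simpa using hc), List.filter_cons_of_neg (by simpa using hc)]
      exact ih (s + 1) cnt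
    · rw [if_pos (by simpa using hc), List.filter_cons_of_pos (by simpa using hc), List.map_cons]
      set mrest := ((PySem.List.enumerate rest (s + 1)).filter
          (fun p => PySem.Str.isIn "stage:" p.2)).map (·.1) with hm
      by_cases he : cnt + 1 = stage_idx
      · rw [if_pos he]
        have h0 : stage_idx - cnt - 1 = 0 := by omega
        rw [if_pos ⟨by omega, by simp only [List.length_cons]; push_cast; omega⟩, h0,
          PySem.List.pyGetD_of_nonneg _ _ (by omega)]
        rfl
      · rw [if_neg he, ih (s + 1) (cnt + 1), hm.symm]
        by_cases hlt : cnt + 1 < stage_idx ∧ stage_idx - (cnt + 1) - 1 < (mrest.length : Int)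
        · rw [if_pos hlt,
            if_pos (⟨by omega, by simp only [List.length_cons]; push_cast; omega⟩ :
              cnt < stage_idx ∧ stage_idx - cnt - 1 < (((s :: mrest).length : Nat) : Int)),
            PySem.List.pyGetD_of_nonneg _ _ (by omega),
            PySem.List.pyGetD_of_nonneg _ _ (by omega)]
          have h1 : (stage_idx - cnt - 1).toNat = (stage_idx - (cnt + 1) - 1).toNat + 1 := by omega
          rw [h1, List.getD_cons_succ]
        · rw [if_neg hlt,
            if_neg (by simp only [List.length_cons] at *; push_cast at hlt ⊢; omega)]

theorem find_stage_line_py_spec : Claim_equal_find_stage_line_py := by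
  intro fl stage_idx _
  unfold Spec_find_stage_line_py find_stage_line_py find_stage_line_py_alt
  rw [pvLoop_eq fl 0 (-1) stage_idx]
  simp only []
  by_cases h : 0 ≤ stage_idx ∧ stage_idx <
      ((((PySem.List.enumerate fl 0).filter
        (fun p => PySem.Str.isIn "stage:" p.2)).map (·.1)).length : Int)
  · rw [if_pos ⟨by omega, by omega⟩, if_pos h]
    congr 1
    omega
  · rw [if_neg (by omega), if_neg h]
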